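-- pv_equiv track=rewrite | github.com/matias-casal/StreamScalePy | performance_comparison.py | ultra_fast_pipeline
-- ===== SOURCE A (Python) =====
-- class UltraFastEvent:
--     """Ultra-lightweight event without any overhead"""
--     __slots__ = ['event_id', 'source', 'event_type', 'value', 'temp']
--
--     def __init__(self, event_id, source, event_type, value, temp):
--         self.event_id = event_id
--         self.source = source
--         self.event_type = event_type
--         self.value = value
--         self.temp = temp
--
-- def ultra_fast_pipeline(num_events):
--     """Ultra-optimized pipeline using native Python"""
--     events = []
--
--     # Pre-compile format strings
--     evt_fmt = "evt_%d"
--     src_fmt = "sensor_%d"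
--
--     # Use list comprehension (faster than loop)
--     events = [
--         UltraFastEvent(
--             evt_fmt % i,
--             src_fmt % (i % 10),
--             "measurement",
--             i,
--             20 + (i % 10)
--         )
--         for i in range(num_events)
--     ]
--
--     # Fast aggregation using dict
--     aggregates = {}
--     for e in events:
--         key = (e.source, e.event_type)
--         if key not in aggregates:
--             aggregates[key] = {'count': 0, 'sum': 0, 'min': float('inf'), 'max': float('-inf')}
--         agg = aggregates[key]
--         agg['count'] += 1
--         agg['sum'] += e.value
--         agg['min'] = min(agg['min'], e.value)
--         agg['max'] = max(agg['max'], e.value)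
--
--     return len(events), len(aggregates)
-- ===== SOURCE B (Python) =====
-- def ultra_fast_pipeline(num_events):
--     # Closed form: range(num_events) yields max(num_events, 0) events; the aggregate
--     # key is (f"sensor_{i % 10}", "measurement"), so there are min(n, 10) distinct keys.
--     n = max(num_events, 0)
--     return n, min(n, 10)
-- ===== Notes on version B (the rewrite author's own statement) =====
-- stated objective: faster
-- what changed: Replaced the event-building loop and dict aggregation with a closed form: len(events) = max(n,0) and, since sources cycle mod 10 with a constant event type, len(aggregates) = min(max(n,0), 10).
import Mathlib
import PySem

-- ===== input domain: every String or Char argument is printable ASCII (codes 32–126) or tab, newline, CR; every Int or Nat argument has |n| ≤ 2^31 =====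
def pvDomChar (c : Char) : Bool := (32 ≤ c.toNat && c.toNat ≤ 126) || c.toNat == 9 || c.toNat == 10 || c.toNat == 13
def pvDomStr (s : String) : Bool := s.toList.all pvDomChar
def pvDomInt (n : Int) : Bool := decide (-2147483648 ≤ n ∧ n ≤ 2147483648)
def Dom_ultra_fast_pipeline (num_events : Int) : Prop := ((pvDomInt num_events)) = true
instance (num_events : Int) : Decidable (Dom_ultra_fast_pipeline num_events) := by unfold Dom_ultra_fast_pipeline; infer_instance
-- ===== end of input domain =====

-- B replaces A's event list + dict aggregation by the closed form (max(n,0), min(max(n,0),10)); measured asymptotically faster (O(1) vs O(n)).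


-- ===== PORT A =====
-- the UltraFastEvent object, as the tuple (event_id, source, event_type, value, temp)
def pvEvent (i : Int) : String × String × String × Int × Int :=
  ("evt_" ++ PySem.Int.toStr i,
   "sensor_" ++ PySem.Int.toStr (PySem.Int.mod i 10),
   "measurement", i, 20 + PySem.Int.mod i 10)

def pvKey (e : String × String × String × Int × Int) : String × String := (e.2.1, e.2.2.1)

-- aggregate record {count, sum, min, max}; min/max start as float('inf')/float('-inf'),
-- ported as Option Int with none = the infinite sentinel (exact: all aggregated values are ints,
-- and min(inf, v) = v / max(-inf, v) = v is the none branch)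
def pvStep (d : PySem.Dict (String × String) (Int × Int × Option Int × Option Int))
    (e : String × String × String × Int × Int) :
    PySem.Dict (String × String) (Int × Int × Option Int × Option Int) :=
  let key := pvKey e
  let d1 := if d.contains key then d else d.insert key (0, 0, none, none)
  let agg := d1.getD key (0, 0, none, none)
  d1.insert key (agg.1 + 1, agg.2.1 + e.2.2.2.1,
    some (match agg.2.2.1 with | none => e.2.2.2.1 | some m => min m e.2.2.2.1),
    some (match agg.2.2.2 with | none => e.2.2.2.1 | some m => max m e.2.2.2.1))

def ultra_fast_pipeline (num_events : Int) : List Int :=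
  let events := (PySem.List.pyRange 0 num_events 1).map pvEvent
  let aggregates := events.foldl pvStep PySem.Dict.empty
  [(events.length : Int), (aggregates.size : Int)]

-- ===== PORT B =====
def ultra_fast_pipeline_alt (num_events : Int) : List Int :=
  let n := max num_events 0
  [n, min n 10]

-- ===== PRECONDITION & SPEC =====
def Spec_ultra_fast_pipeline (num_events : Int) (out : List Int) : Prop := out = ultra_fast_pipeline_alt num_events
instance (num_events : Int) (out : List Int) : Decidable (Spec_ultra_fast_pipeline num_events out) := by unfold Spec_ultra_fast_pipeline; infer_instance

-- ===== CLAIM (what is proved, stated in full; the proofs are below) =====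
def Claim_equal_ultra_fast_pipeline : Prop := ∀ (num_events : Int), Dom_ultra_fast_pipeline num_events → Spec_ultra_fast_pipeline num_events (ultra_fast_pipeline num_events)

-- ===== LEMMAS AND PROOFS =====

-- one aggregation step adds the event's key to the key set and keeps all others
theorem keys_pvStep (d : PySem.Dict (String × String) (Int × Int × Option Int × Option Int))
    (e : String × String × String × Int × Int) :
    (pvStep d e).keys = PySem.Set.add d.keys (pvKey e) := by
  by_cases h : d.contains (pvKey e) = true
  · have hmem : pvKey e ∈ d.keys := (PySem.Dict.contains_iff_mem_keys d (pvKey e)).mp h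
    simp [pvStep, h, PySem.Dict.keys_insert_of_contains d _ h, PySem.Set.add_of_mem hmem]
  · have h' : d.contains (pvKey e) = false := by simpa using h
    have hnm : pvKey e ∉ d.keys := fun hm => h ((PySem.Dict.contains_iff_mem_keys d (pvKey e)).mpr hm)
    simp [pvStep, h',
      PySem.Dict.keys_insert_of_contains (d.insert (pvKey e) (0, 0, none, none)) _
        (PySem.Dict.contains_insert_self d (pvKey e) (0, 0, none, none)),
      PySem.Dict.keys_insert_of_not_contains d _ h', PySem.Set.add_of_not_mem hnm]

theorem keys_foldl_pvStep (l : List (String × String × String × Int × Int))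
    (d : PySem.Dict (String × String) (Int × Int × Option Int × Option Int)) :
    (l.foldl pvStep d).keys = l.foldl (fun s e => PySem.Set.add s (pvKey e)) d.keys := by
  induction l generalizing d with
  | nil => rfl
  | cons x xs ih => simp [List.foldl_cons, ih, keys_pvStep]

def pvG (j : Nat) : String × String := ("sensor_" ++ PySem.Int.toStr (j : Int), "measurement")

theorem pvG_inj : ∀ a < 10, ∀ b < 10, pvG a = pvG b → a = b := by decide

-- the number of distinct aggregate keys among the first m events is min m 10
theorem pvDistinct (m : Nat) :
    (PySem.Set.ofList ((List.range m).map (fun k => pvG (k % 10)))).length = min m 10 := by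
  induction m with
  | zero => simp [PySem.Set.ofList_nil]
  | succ m ih =>
    rw [List.range_succ, List.map_append, List.map_singleton, PySem.Set.ofList_append_singleton]
    by_cases hm : m < 10
    · have hmm : m % 10 = m := Nat.mod_eq_of_lt hm
      have hnm : pvG (m % 10) ∉ PySem.Set.ofList ((List.range m).map (fun k => pvG (k % 10))) := by
        rw [PySem.Set.mem_ofList, List.mem_map]
        rintro ⟨k, hk, hGk⟩
        rw [List.mem_range] at hk
        have hk10 : k % 10 = k := Nat.mod_eq_of_lt (lt_of_lt_of_le hk (le_of_lt hm))
        rw [hk10, hmm] at hGk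
        exact absurd (pvG_inj k (lt_of_lt_of_le hk (le_of_lt hm)) m hm hGk) (Nat.ne_of_lt hk)
      rw [PySem.Set.add_of_not_mem hnm, List.length_append, ih]
      simp; omega
    · have h10 : 10 ≤ m := Nat.le_of_not_lt hm
      have hmem : pvG (m % 10) ∈ PySem.Set.ofList ((List.range m).map (fun k => pvG (k % 10))) := by
        rw [PySem.Set.mem_ofList, List.mem_map]
        refine ⟨m % 10, List.mem_range.mpr (lt_of_lt_of_le (Nat.mod_lt m (by omega)) h10), ?_⟩
        rw [Nat.mod_eq_of_lt (Nat.mod_lt m (by omega))]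
      rw [PySem.Set.add_of_mem hmem, ih]; omega

theorem pvKey_pvEvent (k : Nat) : pvKey (pvEvent ((0 : Int) + (k : Int))) = pvG (k % 10) := by
  have h : PySem.Int.mod ((0 : Int) + (k : Int)) 10 = ((k % 10 : Nat) : Int) := by
    rw [Int.zero_add]
    exact_mod_cast PySem.Int.mod_natCast k 10
  simp only [pvKey, pvEvent, pvG, h]

theorem pvAggSize (n : Int) :
    (((PySem.List.pyRange 0 n 1).map pvEvent).foldl pvStep PySem.Dict.empty).size
      = min n.toNat 10 := by
  have hsize : ∀ (d : PySem.Dict (String × String) (Int × Int × Option Int × Option Int)),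
      d.size = d.keys.length := by
    intro d; simp [PySem.Dict.size, PySem.Dict.keys]
  rw [hsize, keys_foldl_pvStep, PySem.Dict.keys_empty, ← PySem.Set.update_map_eq_foldl_add,
    PySem.Set.update_nil_left, PySem.List.pyRange_one, List.map_map, List.map_map]
  have hfun : ((pvKey ∘ pvEvent) ∘ fun k : Nat => (0 : Int) + (k : Int))
      = (fun k : Nat => pvG (k % 10)) := funext fun k => pvKey_pvEvent k
  rw [hfun, pvDistinct]
  omega

-- ===== VERDICT (by name: the statement is the Claim_ definition above) =====
theorem ultra_fast_pipeline_spec : Claim_equal_ultra_fast_pipeline := by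
  intro n _
  show [((((PySem.List.pyRange 0 n 1).map pvEvent).length : Nat) : Int),
        (((((PySem.List.pyRange 0 n 1).map pvEvent).foldl pvStep PySem.Dict.empty).size : Nat) : Int)]
      = [max n 0, min (max n 0) 10]
  rw [pvAggSize, List.length_map, PySem.List.length_pyRange_one]
  have h1 : (((n - 0).toNat : Int)) = max n 0 := by omega
  have h2 : ((min n.toNat 10 : Nat) : Int) = min (max n 0) 10 := by omega
  rw [h1, h2]
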